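-- pv_equiv track=rewrite | github.com/anivenk25/PDSA_OPPE_prep | pp7.py | domino_solitaire
-- ===== SOURCE A (Python) =====
-- def domino_solitaire(N, grid):
--     # Initialize the dp array with -inf values
--     dp = [-float('inf')] * (N + 1)
--
--     # Base case: no columns covered
--     dp[0] = 0
--
--     # Iterate over the columns from 1 to N
--     for i in range(1, N + 1):
--         # Vertical domino at column i
--         dp[i] = dp[i-1] + abs(grid[0][i-1] - grid[1][i-1])
--
--         # Horizontal domino covering columns (i-1, i), if i > 1
--         if i > 1:
--             dp[i] = max(dp[i], dp[i-2] + abs(grid[0][i-2] - grid[0][i-1]) + abs(grid[1][i-2] - grid[1][i-1]))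
--
--     # The result is the maximum score for the entire grid
--     return dp[N]
-- ===== SOURCE B (Python) =====
-- def domino_solitaire(N, grid):
--     # Top-down memoized recursion over the number of columns covered.
--     cache = {}
--     def solve(i):
--         if i in cache:
--             return cache[i]
--         if i == 0:
--             r = 0
--         elif i == 1:
--             r = abs(grid[0][0] - grid[1][0])
--         else:
--             r = max(solve(i - 1) + abs(grid[0][i-1] - grid[1][i-1]),
--                     solve(i - 2) + abs(grid[0][i-2] - grid[0][i-1])
--                                + abs(grid[1][i-2] - grid[1][i-1]))
--         cache[i] = r
--         return r
--     return solve(N)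
-- ===== Notes on version B (the rewrite author's own statement) =====
-- stated objective: alternative
-- what changed: Replaces the bottom-up dp array initialized with -inf by a top-down memoized recursion solve(i) over the number of covered columns, with explicit base cases for 0 and 1 columns and no sentinel values.
import Mathlib
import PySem

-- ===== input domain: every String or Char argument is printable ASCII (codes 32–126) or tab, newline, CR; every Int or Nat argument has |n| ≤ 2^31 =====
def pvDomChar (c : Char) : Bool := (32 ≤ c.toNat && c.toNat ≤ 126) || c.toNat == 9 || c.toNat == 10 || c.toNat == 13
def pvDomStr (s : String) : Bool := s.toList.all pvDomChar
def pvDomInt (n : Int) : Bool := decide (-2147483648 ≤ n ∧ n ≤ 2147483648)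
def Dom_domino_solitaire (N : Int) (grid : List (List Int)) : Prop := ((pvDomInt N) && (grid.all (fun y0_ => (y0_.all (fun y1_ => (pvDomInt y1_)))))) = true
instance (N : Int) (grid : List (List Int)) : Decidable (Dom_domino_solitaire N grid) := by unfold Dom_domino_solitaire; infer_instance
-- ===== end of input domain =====

-- B replaces A's bottom-up dp array (with -inf sentinels) by a top-down memoized
-- recursion on the number of covered columns (objective: alternative, same cost).

-- ===== PORT A =====
-- grid[r][c] (always in range under Pre_)
def pvGrid (grid : List (List Int)) (r c : Int) : Int :=
  PySem.List.pyGetD (PySem.List.pyGetD grid r []) c 0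

-- float('-inf') modelled as `none`: (-inf) + b = -inf
def pvNegInfAdd : Option Int → Int → Option Int
  | none, _ => none
  | some a, b => some (a + b)

-- max with -inf as `none`
def pvNegInfMax : Option Int → Option Int → Option Int
  | none, y => y
  | some a, none => some a
  | some a, some b => some (max a b)

-- one iteration of A's `for i in range(1, N+1)` body
def pvStepA (grid : List (List Int)) (dp : List (Option Int)) (i : Int) : List (Option Int) :=
  let v := pvNegInfAdd (PySem.List.pyGetD dp (i-1) none)
             (|pvGrid grid 0 (i-1) - pvGrid grid 1 (i-1)|)
  let v := if 1 < i then
      pvNegInfMax v (pvNegInfAdd (PySem.List.pyGetD dp (i-2) none)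
        (|pvGrid grid 0 (i-2) - pvGrid grid 0 (i-1)| + |pvGrid grid 1 (i-2) - pvGrid grid 1 (i-1)|))
    else v
  PySem.List.pySetD dp i v

def domino_solitaire (N : Int) (grid : List (List Int)) : Int :=
  let dp0 : List (Option Int) :=
    PySem.List.pySetD (List.replicate (N+1).toNat none) 0 (some 0)
  let dp := (PySem.List.pyRange 1 (N+1) 1).foldl (pvStepA grid) dp0
  (PySem.List.pyGetD dp N none).getD 0

-- ===== PORT B =====
-- Source B's memoized recursion solve(i); the dict cache is memoization only, the
-- recursion structure (base cases 0 and 1, two-way max) is transcribed as is.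
def pvSolveB (grid : List (List Int)) : Nat → Int
  | 0 => 0
  | 1 => |pvGrid grid 0 0 - pvGrid grid 1 0|
  | (n+2) =>
      max (pvSolveB grid (n+1) + |pvGrid grid 0 ((n:Int)+1) - pvGrid grid 1 ((n:Int)+1)|)
          (pvSolveB grid n + |pvGrid grid 0 (n:Int) - pvGrid grid 0 ((n:Int)+1)|
                           + |pvGrid grid 1 (n:Int) - pvGrid grid 1 ((n:Int)+1)|)

def domino_solitaire_alt (N : Int) (grid : List (List Int)) : Int :=
  pvSolveB grid N.toNat

-- ===== PRECONDITION & SPEC =====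
-- Pre_ excludes exactly the inputs where Python A raises IndexError:
-- negative N (dp[0] = 0 on an empty list), or N ≥ 1 with fewer than two rows
-- or a row shorter than N.
def Pre_domino_solitaire (N : Int) (grid : List (List Int)) : Prop :=
  0 ≤ N ∧ (0 < N → 2 ≤ grid.length ∧ N ≤ (grid.getD 0 []).length ∧ N ≤ (grid.getD 1 []).length)
instance (N : Int) (grid : List (List Int)) : Decidable (Pre_domino_solitaire N grid) := by
  unfold Pre_domino_solitaire; infer_instance

def pvWitness_domino_solitaire : Int × List (List Int) := (2, [[1, 5], [2, 3]])

def Spec_domino_solitaire (N : Int) (grid : List (List Int)) (out : Int) : Prop := out = domino_solitaire_alt N grid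
instance (N : Int) (grid : List (List Int)) (out : Int) : Decidable (Spec_domino_solitaire N grid out) := by unfold Spec_domino_solitaire; infer_instance

-- ===== CLAIM (what is proved, stated in full; the proofs are below) =====
def Claim_equal_domino_solitaire : Prop := ∀ (N : Int) (grid : List (List Int)), Dom_domino_solitaire N grid → Pre_domino_solitaire N grid → Spec_domino_solitaire N grid (domino_solitaire N grid)

-- ===== LEMMAS AND PROOFS =====

-- invariant of A's fold: after processing i = 1 .. n, dp has length M+1 and
-- entry j (j ≤ n) holds `some (pvSolveB grid j)`.

-- one step of A's loop, on any dp whose processed entries agree with pvSolveB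
theorem pvStepA_eq (grid : List (List Int)) (L : List (Option Int)) (m : Nat)
    (h : ∀ j : Nat, j ≤ m → PySem.List.pyGetD L (j:Int) none = some (pvSolveB grid j)) :
    pvStepA grid L ((m:Int)+1) = PySem.List.pySetD L (((m+1 : Nat)):Int) (some (pvSolveB grid (m+1))) := by
  cases m with
  | zero =>
    have h0 := h 0 le_rfl
    simp only [Nat.cast_zero] at h0
    unfold pvStepA
    simp [h0, pvNegInfAdd, pvSolveB]
  | succ k =>
    have h1 := h (k+1) le_rfl
    have h2 := h k (by omega)
    unfold pvStepA
    have e1 : ((k+1:Nat):Int)+1-1 = (((k+1:Nat)):Int) := by ring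
    have e2 : ((k+1:Nat):Int)+1-2 = ((k:Nat):Int) := by push_cast; ring
    rw [e1, e2, h1, h2]
    have hlt : (1:Int) < ((k+1:Nat):Int)+1 := by push_cast; omega
    simp only [if_pos hlt, pvNegInfAdd, pvNegInfMax]
    have e3 : (((k+1:Nat):Int)+1) = (((k+2:Nat)):Int) := by push_cast; ring
    rw [e3]
    congr 1
    show some _ = some (pvSolveB grid (k+2))
    simp only [pvSolveB]
    push_cast
    ring_nf

theorem pvInvA (grid : List (List Int)) (M : Nat) (n : Nat) (hn : n ≤ M) :
    let dp := (PySem.List.pyRange 1 ((n:Int)+1) 1).foldl (pvStepA grid)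
      (PySem.List.pySetD (List.replicate (M+1) (none : Option Int)) 0 (some 0))
    dp.length = M+1 ∧ ∀ j : Nat, j ≤ n → PySem.List.pyGetD dp (j:Int) none = some (pvSolveB grid j) := by
  induction n with
  | zero =>
    rw [show ((0:Nat):Int) + 1 = 1 by norm_num,
      PySem.List.pyRange_one_eq_nil (by norm_num : (1:Int) ≤ 1)]
    have h0 : PySem.List.pySetD (List.replicate (M+1) (none : Option Int)) 0 (some 0)
        = some 0 :: List.replicate M none := by
      rw [PySem.List.pySetD_of_nonneg _ _ (by norm_num)]
      simp [List.replicate_succ]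
    rw [h0]
    refine ⟨by simp, ?_⟩
    intro j hj
    interval_cases j
    simp [PySem.List.pyGetD_zero_cons, pvSolveB]
  | succ m ih =>
    intro dp
    have hm : m ≤ M := by omega
    have hr : PySem.List.pyRange 1 ((m:Int)+1+1) 1
        = PySem.List.pyRange 1 ((m:Int)+1) 1 ++ [(m:Int)+1] :=
      PySem.List.pyRange_one_succ_right (by omega)
    obtain ⟨hlen, hget⟩ := ih hm
    have hdp : dp = pvStepA grid
        ((PySem.List.pyRange 1 ((m:Int)+1) 1).foldl (pvStepA grid)
          (PySem.List.pySetD (List.replicate (M+1) (none : Option Int)) 0 (some 0))) ((m:Int)+1) := by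
      show ((PySem.List.pyRange 1 ((m:Int)+1+1) 1).foldl (pvStepA grid) _) = _
      rw [hr, List.foldl_append]; simp
    have hin : m+1 < ((PySem.List.pyRange 1 ((m:Int)+1) 1).foldl (pvStepA grid)
        (PySem.List.pySetD (List.replicate (M+1) (none : Option Int)) 0 (some 0))).length := by
      rw [hlen]; omega
    rw [hdp, pvStepA_eq grid _ m hget]
    constructor
    · rw [PySem.List.pySetD_natCast, List.length_set]; exact hlen
    · intro j hj
      rw [PySem.List.pyGetD_pySetD_natCast _ _ _ _ _ hin]
      by_cases hje : j = m+1
      · rw [if_pos hje, hje]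
      · rw [if_neg hje]
        exact hget j (by omega)

-- ===== VERDICT (by name: the statement is the Claim_ definition above) =====
theorem domino_solitaire_spec : Claim_equal_domino_solitaire := by
  intro N grid _ hpre
  obtain ⟨hN, -⟩ := hpre
  show domino_solitaire N grid = domino_solitaire_alt N grid
  unfold domino_solitaire domino_solitaire_alt
  have hNM : N = (N.toNat : Int) := (Int.toNat_of_nonneg hN).symm
  rw [hNM]
  have h1 : (((N.toNat : Int))+1).toNat = N.toNat + 1 := by omega
  rw [h1]
  obtain ⟨-, hget⟩ := pvInvA grid N.toNat N.toNat le_rfl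
  simp only []
  rw [hget N.toNat le_rfl, Int.toNat_natCast]
  rfl
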